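-- pv_equiv track=rewrite | github.com/ZippoAI/Python-Full-Course | Python/chapter13/tempCodeRunnerFile.py | sumOrProduct
-- ===== SOURCE A (Python) =====
-- def sumOrProduct(n, q):
--     MOD = 10**9 + 7
--     if q == 1:
--         empty = 0
--         for i in range(1,n+1):
--             empty+=i
--         return empty
--     else:
--         empty = 1
--         for i in range(1,n+1):
--             empty = (empty *i) % MOD
--         return empty
-- ===== SOURCE B (Python) =====
-- def sumOrProduct(n, q):
--     MOD = 10**9 + 7
--     if q == 1:
--         # closed-form triangular number; range(1, n+1) is empty for n < 1
--         return n * (n + 1) // 2 if n >= 1 else 0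
--     acc = 1
--     k = n
--     while k >= 1:
--         acc = acc * k % MOD
--         k -= 1
--     return acc
-- ===== Notes on version B (the rewrite author's own statement) =====
-- stated objective: alternative
-- what changed: The sum branch's O(n) accumulation loop is replaced by the closed form n*(n+1)//2 (0 for n<1), and the modular-factorial branch multiplies in a descending while loop instead of iterating an ascending range.
import Mathlib
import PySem

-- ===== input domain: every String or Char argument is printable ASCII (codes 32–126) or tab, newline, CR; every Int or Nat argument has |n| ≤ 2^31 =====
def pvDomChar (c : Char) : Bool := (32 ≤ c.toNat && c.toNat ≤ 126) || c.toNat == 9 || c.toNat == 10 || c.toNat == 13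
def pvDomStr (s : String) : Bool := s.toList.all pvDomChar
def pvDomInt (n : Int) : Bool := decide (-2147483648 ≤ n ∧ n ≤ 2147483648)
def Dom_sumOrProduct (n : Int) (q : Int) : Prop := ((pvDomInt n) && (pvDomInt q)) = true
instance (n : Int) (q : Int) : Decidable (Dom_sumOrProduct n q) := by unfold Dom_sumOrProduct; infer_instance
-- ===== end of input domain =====

-- B replaces the sum branch's loop by the closed form n*(n+1)//2 (0 for n < 1) and
-- runs the modular-factorial loop downward from n instead of over an ascending range.

-- ===== PORT A =====
def sumOrProduct (n : Int) (q : Int) : Int :=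
  let MOD : Int := 10 ^ 9 + 7
  if q == 1 then
    (PySem.List.pyRange 1 (n + 1) 1).foldl (fun empty i => empty + i) 0
  else
    (PySem.List.pyRange 1 (n + 1) 1).foldl (fun empty i => (empty * i) % MOD) 1

-- ===== PORT B =====
-- the descending 'while k >= 1' loop of Source B, recursing on k (as a Nat, since it counts down to 0)
def pvAltLoop (MOD : Int) : Nat → Int → Int
  | 0, acc => acc
  | k + 1, acc => pvAltLoop MOD k (acc * ((k : Int) + 1) % MOD)

def sumOrProduct_alt (n : Int) (q : Int) : Int :=
  let MOD : Int := 10 ^ 9 + 7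
  if q == 1 then
    if n ≥ 1 then n * (n + 1) / 2 else 0
  else
    pvAltLoop MOD n.toNat 1

-- ===== PRECONDITION & SPEC =====
def Spec_sumOrProduct (n : Int) (q : Int) (out : Int) : Prop := out = sumOrProduct_alt n q
instance (n : Int) (q : Int) (out : Int) : Decidable (Spec_sumOrProduct n q out) := by unfold Spec_sumOrProduct; infer_instance

-- ===== CLAIM (what is proved, stated in full; the proofs are below) =====
def Claim_equal_sumOrProduct : Prop := ∀ (n : Int) (q : Int), Dom_sumOrProduct n q → Spec_sumOrProduct n q (sumOrProduct n q)

-- ===== LEMMAS AND PROOFS =====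

-- A's sum loop is 0 + (sum of the range)
lemma foldl_add_eq_sum (l : List Int) (a : Int) :
    l.foldl (fun e i => e + i) a = a + l.sum := by
  induction l generalizing a with
  | nil => simp
  | cons x xs ih => simp [List.foldl, ih, add_assoc]

-- A's product loop computes (a * prod l) % M whenever the accumulator is already reduced mod M
lemma foldl_modmul (M : Int) (l : List Int) (a : Int) :
    l.foldl (fun e i => (e * i) % M) (a % M) = (a * l.prod) % M := by
  induction l generalizing a with
  | nil => simp
  | cons x xs ih =>
      have h : (a % M * x) % M = (a * x) % M := by
        rw [Int.mul_emod, Int.emod_emod_of_dvd _ dvd_rfl, ← Int.mul_emod]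
      simp only [List.foldl, List.prod_cons, h, ih (a * x), mul_assoc]

-- B's countdown loop computes (a * k!) % M from a reduced accumulator
lemma pvAltLoop_eq (M : Int) (k : Nat) (a : Int) :
    pvAltLoop M k (a % M) = (a * (k.factorial : Int)) % M := by
  induction k generalizing a with
  | zero => simp [pvAltLoop, Nat.factorial]
  | succ k ih =>
      have h : a % M * ((k : Int) + 1) % M = (a * ((k : Int) + 1)) % M := by
        rw [Int.mul_emod, Int.emod_emod_of_dvd _ dvd_rfl, ← Int.mul_emod]
      rw [pvAltLoop, h, ih (a * ((k : Int) + 1))]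
      congr 1
      push_cast [Nat.factorial_succ]
      ring

-- the ascending range 1..m, as a list of Ints, sums to the triangular number and multiplies to m!
lemma pyRange_sum_prod (m : Nat) :
    2 * (PySem.List.pyRange 1 ((m : Int) + 1) 1).sum = (m : Int) * ((m : Int) + 1) ∧
    (PySem.List.pyRange 1 ((m : Int) + 1) 1).prod = (m.factorial : Int) := by
  induction m with
  | zero => simp [PySem.List.pyRange_one_eq_nil, Nat.factorial]
  | succ m ih =>
      have hsplit : PySem.List.pyRange 1 (((m : Int) + 1) + 1) 1
          = PySem.List.pyRange 1 ((m : Int) + 1) 1 ++ [(m : Int) + 1] :=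
        PySem.List.pyRange_one_succ_right (by omega)
      constructor
      · push_cast
        rw [hsplit]
        simp only [List.sum_append, List.sum_cons, List.sum_nil]
        linear_combination ih.1
      · push_cast
        rw [hsplit]
        simp only [List.prod_append, List.prod_cons, List.prod_nil, ih.2]
        push_cast [Nat.factorial_succ]
        ring

-- ===== VERDICT (by name: the statement is the Claim_ definition above) =====
theorem sumOrProduct_spec : Claim_equal_sumOrProduct := by
  intro n q _
  unfold Spec_sumOrProduct sumOrProduct sumOrProduct_alt
  by_cases hq : q = 1
  · simp only [hq, BEq.rfl, ite_true]
    by_cases hn : n ≥ 1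
    · have hm : ((n.toNat : Int)) = n := Int.toNat_of_nonneg (by omega)
      obtain ⟨hsum, -⟩ := pyRange_sum_prod n.toNat
      rw [hm] at hsum
      rw [foldl_add_eq_sum, if_pos hn, zero_add]
      omega
    · rw [if_neg hn, PySem.List.pyRange_one_eq_nil (by omega)]
      simp
  · have hq' : (q == 1) = false := by simp [hq]
    simp only [hq', Bool.false_eq_true, ite_false]
    by_cases hn : 0 ≤ n
    · have hm : ((n.toNat : Int)) = n := Int.toNat_of_nonneg hn
      obtain ⟨-, hprod⟩ := pyRange_sum_prod n.toNat
      rw [hm] at hprod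
      have hf := foldl_modmul (10 ^ 9 + 7) (PySem.List.pyRange 1 (n + 1) 1) 1
      have hb := pvAltLoop_eq (10 ^ 9 + 7) n.toNat 1
      norm_num at hf hb ⊢
      rw [hf, hb, hprod]
    · have hz : n.toNat = 0 := Int.toNat_of_nonpos (by omega)
      rw [PySem.List.pyRange_one_eq_nil (by omega), hz]
      simp [pvAltLoop]
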